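-- pv_equiv track=rewrite | github.com/oudeng/LGO | utility_analysis/07_gen_thresholds_units_old.py | iter_calls
-- ===== SOURCE A (Python) =====
-- def iter_calls(expr, fname="lgo_thre"):
--     """Yields (start_idx, end_idx, inside_content) for each fname(...) call.
--     Supports multiple gate functions: lgo_thre, lgo_and2, lgo_or2, gate_expr, lgo_gate"""
--     if not isinstance(expr, str): return
--     i = 0
--     L = len(expr)
--     while i < L:
--         j = expr.find(fname+"(", i)
--         if j < 0: break
--         # find matching ')'
--         depth = 0; k = j+len(fname)
--         # skip to first '('
--         while k < L and expr[k] != '(':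
--             k += 1
--         start = k+1
--         depth = 1; k = start
--         while k < L and depth > 0:
--             if expr[k] == '(':
--                 depth += 1
--             elif expr[k] == ')':
--                 depth -= 1
--             k += 1
--         end = k-1
--         yield (j, end+1, expr[start:end])
--         i = end+1
-- ===== SOURCE B (Python) =====
-- def iter_calls(expr, fname="lgo_thre"):
--     """Yields (start_idx, end_idx, inside_content) for each fname(...) call.
--     Supports multiple gate functions: lgo_thre, lgo_and2, lgo_or2, gate_expr, lgo_gate
--
--     Stack-based variant: one pass over expr builds a parenthesis-matching
--     table `close` (close[p] = index of the ')' matching the '(' at p;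
--     unmatched opens fall through to len(expr)-1), then a single left-to-right
--     sweep emits a call at every position where the pattern starts, jumping
--     past the span just emitted.  No per-call depth-counting scan."""
--     if not isinstance(expr, str):
--         return
--     L = len(expr)
--     close = [L - 1] * L
--     stack = []
--     for k, c in enumerate(expr):
--         if c == '(':
--             stack.append(k)
--         elif c == ')':
--             if stack:
--                 close[stack.pop()] = k
--     pat = fname + "("
--     i = 0
--     while i < L:
--         if expr.startswith(pat, i):
--             op = i + len(fname)          # position of the '(' of this call
--             end = close[op]
--             yield (i, end + 1, expr[op + 1:end])
--             i = end + 1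
--         else:
--             i += 1
-- ===== Notes on version B (the rewrite author's own statement) =====
-- stated objective: alternative
-- what changed: Replaces A's per-call depth-counting scan with a stack-based parenthesis-matching table built in one pass over the whole string (unmatched opens default to len-1, which is where A's scan falls through), followed by a single startswith sweep that looks each call's closing paren up in the table instead of scanning for it.
import Mathlib
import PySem

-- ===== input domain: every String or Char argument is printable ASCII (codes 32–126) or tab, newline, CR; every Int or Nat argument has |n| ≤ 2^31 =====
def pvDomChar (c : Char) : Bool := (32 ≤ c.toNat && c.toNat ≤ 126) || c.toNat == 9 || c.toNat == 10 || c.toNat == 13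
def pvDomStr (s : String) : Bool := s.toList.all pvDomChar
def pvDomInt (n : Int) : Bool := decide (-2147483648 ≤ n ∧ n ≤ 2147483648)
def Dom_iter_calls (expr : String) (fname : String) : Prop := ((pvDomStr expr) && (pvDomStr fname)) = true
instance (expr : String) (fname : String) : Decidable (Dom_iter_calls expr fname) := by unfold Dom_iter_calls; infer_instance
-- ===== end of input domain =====

-- B replaces A's per-call depth-counting scan by a one-pass stack-built parenthesis-matching
-- table plus a single startswith sweep; same output (both Pythons are generators; the
-- equivalence is about the list of yielded tuples).

-- ===== PORT A =====
-- strings are ported through .toList (PySem.Chars primitives); indices are Nats (all loop indices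
-- in A are nonnegative and only ever incremented).

/-- A's `while k < L and expr[k] != '(': k += 1` (guard makes `getD` exact). -/
def pvSkipParen (cs : List Char) (L k : Nat) : Nat :=
  if k < L ∧ cs.getD k ' ' ≠ '(' then pvSkipParen cs L (k + 1) else k
termination_by L - k
decreasing_by omega

/-- A's depth loop `while k < L and depth > 0: …; k += 1`; returns the final `k`. -/
def pvDepthScan (cs : List Char) (L k : Nat) (depth : Int) : Nat :=
  if k < L ∧ 0 < depth then
    pvDepthScan cs L (k + 1)
      (if cs.getD k ' ' = '(' then depth + 1
       else if cs.getD k ' ' = ')' then depth - 1 else depth)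
  else k
termination_by L - k
decreasing_by omega

/-- A's main `while i < L` loop. `i` strictly increases each iteration, so fuel `L + 1` never
    runs out; fuel is only the recursion measure, not a change of algorithm. -/
def pvLoopA (cs fn : List Char) (L : Nat) : Nat → Nat → List (Int × Int × String)
  | 0, _ => []
  | fuel + 1, i =>
    if i < L then
      let j := PySem.Chars.findFrom cs (fn ++ ['(']) (i : Int)   -- expr.find(fname+"(", i)
      if j < 0 then []
      else
        let jn := j.toNat
        let k0 := pvSkipParen cs L (jn + fn.length)               -- skip to first '('
        let start := k0 + 1
        let k := pvDepthScan cs L start 1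
        let e := k - 1                                            -- end = k-1 (k ≥ start ≥ 1 here)
        ((jn : Int), (e : Int) + 1,
          String.ofList (PySem.List.slice cs (some (start : Int)) (some (e : Int))))  -- expr[start:end]
          :: pvLoopA cs fn L fuel (e + 1)
    else []

def iter_calls (expr : String) (fname : String) : List (Int × Int × String) :=
  let cs := expr.toList
  pvLoopA cs fname.toList cs.length (cs.length + 1) 0

-- ===== PORT B =====

/-- B's loop body of `for k, c in enumerate(expr)`: push '(' positions, pop on ')',
    recording the match in the close table. State is `(close, stack)`; the Python list
    used as a stack (append/pop at the same end) is the cons-stack. -/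
def pvCloseFold (st : List Nat × List Nat) (kc : Char × Nat) : List Nat × List Nat :=
  if kc.1 = '(' then (st.1, kc.2 :: st.2)
  else if kc.1 = ')' then
    match st.2 with
    | [] => st
    | p :: rest => (st.1.set p kc.2, rest)
  else st

/-- B's table pass: `close = [L-1]*L; stack = []; for k, c in enumerate(expr): …`.
    `enumerate` is ported as `zipIdx` (indices are nonnegative Nats). -/
def pvCloseTable (cs : List Char) : List Nat :=
  (cs.zipIdx.foldl pvCloseFold (List.replicate cs.length (cs.length - 1), [])).1

/-- B's `while i < L` sweep; `i` strictly increases each iteration, so fuel `L + 1` never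
    runs out. `expr.startswith(pat, i)` is ported as a prefix test on `cs.drop i`
    (exact: `i` is a nonnegative in-range index); `close[op]` as `getD` (exact: `op < L`). -/
def pvLoopB (cs fn : List Char) (close : List Nat) (L : Nat) : Nat → Nat → List (Int × Int × String)
  | 0, _ => []
  | fuel + 1, i =>
    if i < L then
      if PySem.Chars.startswith (cs.drop i) (fn ++ ['(']) then
        let op := i + fn.length                                  -- position of the '(' of this call
        let e := close.getD op 0                                 -- end = close[op]
        ((i : Int), (e : Int) + 1,
          String.ofList (PySem.List.slice cs (some ((op + 1 : Nat) : Int)) (some ((e : Nat) : Int))))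
          :: pvLoopB cs fn close L fuel (e + 1)
      else pvLoopB cs fn close L fuel (i + 1)
    else []

def iter_calls_alt (expr : String) (fname : String) : List (Int × Int × String) :=
  let cs := expr.toList
  pvLoopB cs fname.toList (pvCloseTable cs) cs.length (cs.length + 1) 0

-- ===== PRECONDITION & SPEC =====
def Spec_iter_calls (expr : String) (fname : String) (out : List (Int × Int × String)) : Prop := out = iter_calls_alt expr fname
instance (expr : String) (fname : String) (out : List (Int × Int × String)) : Decidable (Spec_iter_calls expr fname out) := by unfold Spec_iter_calls; infer_instance

-- ===== CLAIM (what is proved, stated in full; the proofs are below) =====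
def Claim_equal_iter_calls : Prop := ∀ (expr : String) (fname : String), Dom_iter_calls expr fname → Spec_iter_calls expr fname (iter_calls expr fname)

-- ===== LEMMAS AND PROOFS =====

theorem le_pvDepthScan (cs : List Char) (L : Nat) :
    ∀ k d, k ≤ pvDepthScan cs L k d := by
  have H : ∀ n k d, L - k ≤ n → k ≤ pvDepthScan cs L k d := by
    intro n
    induction n with
    | zero =>
      intro k d hn
      rw [pvDepthScan]
      by_cases hc : k < L ∧ 0 < d
      · omega
      · rw [if_neg hc]
    | succ n ih =>
      intro k d hn
      rw [pvDepthScan]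
      by_cases hc : k < L ∧ 0 < d
      · rw [if_pos hc]
        have := ih (k + 1) (if cs.getD k ' ' = '(' then d + 1
          else if cs.getD k ' ' = ')' then d - 1 else d) (by omega)
        omega
      · rw [if_neg hc]
  intro k d; exact H (L - k) k d le_rfl

/-- Scan composition: a scan at depth `d + 1` first returns to depth `d` exactly where a fresh
    depth-1 scan finishes, and continues from there at depth `d`. -/
theorem pvDepthScan_succ (cs : List Char) (L : Nat) :
    ∀ k (d : Nat), pvDepthScan cs L k ((d : Int) + 1) = pvDepthScan cs L (pvDepthScan cs L k 1) (d : Int) := by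
  have H : ∀ n k (d : Nat), L - k ≤ n →
      pvDepthScan cs L k ((d : Int) + 1) = pvDepthScan cs L (pvDepthScan cs L k 1) (d : Int) := by
    intro n
    induction n with
    | zero =>
      intro k d hn
      have hk : ¬ k < L := by omega
      rw [pvDepthScan, if_neg (fun h => hk h.1)]
      rw [show pvDepthScan cs L k 1 = k by rw [pvDepthScan, if_neg (fun h => hk h.1)]]
      rw [pvDepthScan, if_neg (fun h => hk h.1)]
    | succ n ih =>
      intro k d hn
      by_cases hk : k < L
      · rw [pvDepthScan, if_pos ⟨hk, by omega⟩]
        rw [show pvDepthScan cs L k 1 = pvDepthScan cs L (k + 1)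
              (if cs.getD k ' ' = '(' then (1 : Int) + 1
               else if cs.getD k ' ' = ')' then 1 - 1 else 1) by
          rw [pvDepthScan, if_pos ⟨hk, by omega⟩]]
        by_cases h1 : cs.getD k ' ' = '('
        · simp only [h1, if_true]
          have e1 : ((d : Int) + 1 + 1) = (((d + 1 : Nat) : Int) + 1) := by push_cast; ring
          have e2 : ((1 : Int) + 1) = (((1 : Nat) : Int) + 1) := by norm_num
          rw [e1, e2, ih (k + 1) (d + 1) (by omega), ih (k + 1) 1 (by omega)]
          have hm : k + 1 ≤ pvDepthScan cs L (k + 1) 1 := le_pvDepthScan cs L (k + 1) 1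
          have e3 : ((d + 1 : Nat) : Int) = ((d : Nat) : Int) + 1 := by push_cast; ring
          rw [e3, ih (pvDepthScan cs L (k + 1) 1) d (by omega)]
          rw [show ((1 : Nat) : Int) = (1 : Int) by norm_num]
        · by_cases h2 : cs.getD k ' ' = ')'
          · simp only [h2, if_true]
            have e1 : ((d : Int) + 1 - 1) = (d : Int) := by ring
            have e2 : ((1 : Int) - 1) = (0 : Int) := by norm_num
            rw [e1, e2, if_neg (by decide), if_neg (by decide)]
            rw [show pvDepthScan cs L (k + 1) 0 = k + 1 by
              rw [pvDepthScan, if_neg (fun h => by omega)]]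
          · simp only [h1, if_false, h2]
            rw [ih (k + 1) d (by omega)]
      · rw [pvDepthScan, if_neg (fun h => hk h.1)]
        rw [show pvDepthScan cs L k 1 = k by rw [pvDepthScan, if_neg (fun h => hk h.1)]]
        rw [pvDepthScan, if_neg (fun h => hk h.1)]
  intro k d; exact H (L - k) k d le_rfl

/-- Invariant of B's stack during the table pass, at current position `k`: each stacked open
    paren's depth-1 scan, resumed where the scan of the paren above it finished (at `k` for the
    top), coincides with a fresh depth-1 scan from that resume point. -/
def pvStackInv (cs : List Char) (L : Nat) : Nat → List Nat → Prop
  | _, [] => True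
  | k, p :: rest => cs.getD p ' ' = '(' ∧ p < k ∧ (∀ q ∈ rest, q < p) ∧
      pvDepthScan cs L (p + 1) 1 = pvDepthScan cs L k 1 ∧
      pvStackInv cs L (pvDepthScan cs L (p + 1) 1) rest

theorem pvStackInv_lt (cs : List Char) (L : Nat) :
    ∀ (st : List Nat) (k : Nat), pvStackInv cs L k st → ∀ q ∈ st, q < k := by
  intro st
  induction st with
  | nil => intro k _ q hq; exact absurd hq List.not_mem_nil
  | cons p rest ih =>
    intro k hinv q hq
    rcases List.mem_cons.mp hq with h | h
    · exact h ▸ hinv.2.1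
    · exact lt_trans (hinv.2.2.1 q h) hinv.2.1

theorem pvStackInv_mono (cs : List Char) (L : Nat) :
    ∀ (st : List Nat) (k k' : Nat), pvStackInv cs L k st →
      pvDepthScan cs L k 1 = pvDepthScan cs L k' 1 → k ≤ k' →
      pvStackInv cs L k' st := by
  intro st
  cases st with
  | nil => intro k k' _ _ _; trivial
  | cons p rest =>
    intro k k' hinv heq hle
    exact ⟨hinv.1, lt_of_lt_of_le hinv.2.1 hle, hinv.2.2.1, hinv.2.2.2.1.trans heq, hinv.2.2.2.2⟩

theorem pvStackInv_at_end (cs : List Char) (L : Nat) :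
    ∀ (st : List Nat), pvStackInv cs L L st → ∀ p ∈ st, pvDepthScan cs L (p + 1) 1 = L := by
  intro st
  induction st with
  | nil => intro _ p hp; exact absurd hp List.not_mem_nil
  | cons p rest ih =>
    intro hinv q hq
    have hLL : pvDepthScan cs L L 1 = L := by
      rw [pvDepthScan, if_neg (fun h => by omega)]
    have htop : pvDepthScan cs L (p + 1) 1 = L := by rw [hinv.2.2.2.1, hLL]
    rcases List.mem_cons.mp hq with h | h
    · exact h ▸ htop
    · have h5 := hinv.2.2.2.2
      rw [htop] at h5
      exact ih h5 q h

/-- Invariant of B's close table after processing the first `k` characters. -/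
def pvCloseInv (cs : List Char) (L k : Nat) (close : List Nat) (stack : List Nat) : Prop :=
  close.length = L ∧
  (∀ p, p < k → cs.getD p ' ' = '(' → p ∉ stack →
      close.getD p 0 = pvDepthScan cs L (p + 1) 1 - 1) ∧
  (∀ p ∈ stack, close.getD p 0 = L - 1) ∧
  (∀ p, k ≤ p → p < L → close.getD p 0 = L - 1)

theorem getD_set_self (l : List Nat) (p v : Nat) (hp : p < l.length) :
    (l.set p v).getD p 0 = v := by
  simp [List.getD_eq_getElem?_getD, hp]

theorem getD_set_ne (l : List Nat) (p q v : Nat) (h : q ≠ p) :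
    (l.set p v).getD q 0 = l.getD q 0 := by
  simp [List.getD_eq_getElem?_getD, List.getElem?_set_ne (by omega : p ≠ q)]

/-- One step of the table pass preserves both invariants. -/
theorem pvCloseFold_step (cs : List Char) (L k : Nat) (close stack : List Nat)
    (hL : L = cs.length) (hk : k < L)
    (hs : pvStackInv cs L k stack) (hc : pvCloseInv cs L k close stack) :
    pvStackInv cs L (k + 1) (pvCloseFold (close, stack) (cs.getD k ' ', k)).2 ∧
    pvCloseInv cs L (k + 1) (pvCloseFold (close, stack) (cs.getD k ' ', k)).1
      (pvCloseFold (close, stack) (cs.getD k ' ', k)).2 := by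
  obtain ⟨hlen, hset, hstk, hhi⟩ := hc
  by_cases h1 : cs.getD k ' ' = '('
  · -- push k
    have hfv : pvCloseFold (close, stack) (cs.getD k ' ', k) = (close, k :: stack) := by
      rw [h1]; rfl
    rw [hfv]
    have hstep : pvDepthScan cs L k 1 = pvDepthScan cs L (pvDepthScan cs L (k + 1) 1) 1 := by
      rw [pvDepthScan, if_pos ⟨hk, by omega⟩, h1, if_pos rfl]
      rw [show (1 : Int) + 1 = ((1 : Nat) : Int) + 1 by norm_num, pvDepthScan_succ,
        show ((1 : Nat) : Int) = (1 : Int) by norm_num]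
    have hlt := pvStackInv_lt cs L stack k hs
    refine ⟨⟨h1, by omega, fun q hq => hlt q hq, rfl, ?_⟩, hlen, ?_, ?_, ?_⟩
    · exact pvStackInv_mono cs L stack k (pvDepthScan cs L (k + 1) 1) hs hstep
        (le_trans (by omega) (le_pvDepthScan cs L (k + 1) 1))
    · intro p hp hpc hpn
      exact hset p (by
          rcases Nat.lt_succ_iff_lt_or_eq.mp hp with h | h
          · exact h
          · exact absurd (h ▸ List.mem_cons_self) hpn) hpc
        (fun h => hpn (List.mem_cons_of_mem _ h))
    · intro p hp
      rcases List.mem_cons.mp hp with h | h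
      · exact h ▸ hhi k le_rfl hk
      · exact hstk p h
    · intro p hp hpL; exact hhi p (by omega) hpL
  · by_cases h2 : cs.getD k ' ' = ')'
    · -- pop (if nonempty)
      have hkscan : pvDepthScan cs L k 1 = k + 1 := by
        rw [pvDepthScan, if_pos ⟨hk, by omega⟩, if_neg h1, h2, if_pos rfl]
        norm_num
        rw [pvDepthScan, if_neg (fun h => by omega)]
      cases stack with
      | nil =>
        have hfv : pvCloseFold (close, ([] : List Nat)) (cs.getD k ' ', k) = (close, []) := by
          rw [h2]; rfl
        rw [hfv]
        refine ⟨trivial, hlen, ?_, fun p hp => absurd hp List.not_mem_nil,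
          fun p hp hpL => hhi p (by omega) hpL⟩
        intro p hp hpc _
        have hpk : p ≠ k := fun h => by rw [h] at hpc; exact h1 hpc
        exact hset p (by omega) hpc (fun h => absurd h List.not_mem_nil)
      | cons q rest =>
        obtain ⟨hq1, hq2, hq3, hq4, hq5⟩ := hs
        have hqscan : pvDepthScan cs L (q + 1) 1 = k + 1 := by rw [hq4, hkscan]
        have hfv : pvCloseFold (close, q :: rest) (cs.getD k ' ', k) = (close.set q k, rest) := by
          rw [h2]; rfl
        rw [hfv]
        rw [hqscan] at hq5
        refine ⟨hq5, ?_, ?_, ?_, ?_⟩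
        · rw [List.length_set]; exact hlen
        · intro p hp hpc hpn
          by_cases hpq : p = q
          · subst hpq
            rw [getD_set_self close p k (by omega), hqscan]
            omega
          · have hpk : p ≠ k := fun h => by rw [h] at hpc; exact h1 hpc
            rw [getD_set_ne close q p k hpq]
            exact hset p (by omega) hpc (fun h => by
              rcases List.mem_cons.mp h with h' | h'
              · exact hpq h'
              · exact hpn h')
        · intro p hp
          have hpq : p ≠ q := fun h => by have := hq3 p hp; omega
          rw [getD_set_ne close q p k hpq]
          exact hstk p (List.mem_cons_of_mem _ hp)
        · intro p hp hpL
          have hpq : p ≠ q := fun h => by omega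
          rw [getD_set_ne close q p k hpq]
          exact hhi p (by omega) hpL
    · -- other character
      have hfv : pvCloseFold (close, stack) (cs.getD k ' ', k) = (close, stack) := by
        unfold pvCloseFold
        rw [if_neg h1, if_neg h2]
      rw [hfv]
      have hstep : pvDepthScan cs L k 1 = pvDepthScan cs L (k + 1) 1 := by
        rw [pvDepthScan, if_pos ⟨hk, by omega⟩, if_neg h1, if_neg h2]
      refine ⟨pvStackInv_mono cs L stack k (k + 1) hs hstep (by omega), hlen, ?_, hstk,
        fun p hp hpL => hhi p (by omega) hpL⟩
      intro p hp hpc hpn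
      have hpk : p ≠ k := fun h => by rw [h] at hpc; exact h1 hpc
      exact hset p (by omega) hpc hpn

/-- The whole table pass, by induction over the remaining suffix. -/
theorem pvCloseFold_run (cs : List Char) (L : Nat) (hL : L = cs.length) :
    ∀ (suf : List Char) (k : Nat) (close stack : List Nat),
      cs.drop k = suf → k ≤ L →
      pvStackInv cs L k stack → pvCloseInv cs L k close stack →
      pvStackInv cs L L ((suf.zipIdx k).foldl pvCloseFold (close, stack)).2 ∧
      pvCloseInv cs L L ((suf.zipIdx k).foldl pvCloseFold (close, stack)).1
        ((suf.zipIdx k).foldl pvCloseFold (close, stack)).2 := by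
  intro suf
  induction suf with
  | nil =>
    intro k close stack hdrop hkle hs hc
    have hkL : L ≤ k := by
      have := congrArg List.length hdrop
      simp at this; omega
    have hkeq : k = L := by omega
    subst hkeq
    simpa using ⟨hs, hc⟩
  | cons c rest ih =>
    intro k close stack hdrop hkle hs hc
    have hk : k < cs.length := by
      have := congrArg List.length hdrop
      simp at this; omega
    have hck : cs.getD k ' ' = c := by
      have h0 : cs[k]? = (cs.drop k)[0]? := by
        simp [List.getElem?_drop]
      rw [List.getD_eq_getElem?_getD, h0, hdrop]
      simp
    have hrest : cs.drop (k + 1) = rest := by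
      have : cs.drop (k + 1) = (cs.drop k).drop 1 := by rw [List.drop_drop]
      rw [this, hdrop]; simp
    rw [List.zipIdx_cons, List.foldl_cons]
    have hstep := pvCloseFold_step cs L k close stack hL (by omega) hs hc
    rw [hck] at hstep
    have := ih (k + 1) (pvCloseFold (close, stack) (c, k)).1 (pvCloseFold (close, stack) (c, k)).2
      hrest (by omega) hstep.1 hstep.2
    simpa using this

/-- Table correctness: `close[p]` is exactly where A's depth-1 scan from `p + 1` lands, minus 1. -/
theorem pvCloseTable_spec (cs : List Char) (p : Nat) (hp : p < cs.length)
    (hc : cs.getD p ' ' = '(') :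
    (pvCloseTable cs).getD p 0 = pvDepthScan cs cs.length (p + 1) 1 - 1 := by
  have hinit : pvCloseInv cs cs.length 0 (List.replicate cs.length (cs.length - 1)) [] := by
    refine ⟨by simp, fun p hp _ _ => by omega, fun p hp => absurd hp List.not_mem_nil, ?_⟩
    intro q _ hq
    rw [List.getD_eq_getElem?_getD, List.getElem?_replicate]
    simp [hq]
  have hrun := pvCloseFold_run cs cs.length rfl cs 0
    (List.replicate cs.length (cs.length - 1)) [] (by simp) (by omega) trivial hinit
  obtain ⟨hsfin, _, hset, hstk, _⟩ := hrun
  set r := ((cs.zipIdx 0).foldl pvCloseFold (List.replicate cs.length (cs.length - 1), [])) with hr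
  by_cases hmem : p ∈ r.2
  · have hscan := pvStackInv_at_end cs cs.length r.2 hsfin p hmem
    rw [hscan]
    have : (pvCloseTable cs).getD p 0 = r.1.getD p 0 := by
      unfold pvCloseTable
      rw [← hr]
    rw [this, hstk p hmem]
  · have : (pvCloseTable cs).getD p 0 = r.1.getD p 0 := by
      unfold pvCloseTable
      rw [← hr]
    rw [this]
    exact hset p hp hc hmem

-- ── findFrom characterizations (shared by the loop equivalence) ──

/-- For a nonempty pattern, `expr.find(pat, c) == -1` says exactly: no position `t ≥ c` starts
    an occurrence of `pat`. -/
theorem findFrom_eq_neg_one_iff_no_occ (cs pat : List Char) (hpat : pat ≠ [])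
    (c : Nat) (hc : c ≤ cs.length) :
    PySem.Chars.findFrom cs pat (c : Int) = -1 ↔
      ∀ t, c ≤ t → t < cs.length → ¬ pat <+: cs.drop t := by
  rw [PySem.Chars.findFrom_natCast_eq_neg_one_iff cs pat c hc]
  constructor
  · intro hninf t h1 h2 hocc
    apply hninf
    have hdd : cs.drop t = (cs.drop c).drop (t - c) := by
      rw [List.drop_drop]; congr 1; omega
    have hx : pat <+: (cs.drop c).drop (t - c) := hdd ▸ hocc
    exact hx.isInfix.trans (List.drop_suffix _ _).isInfix
  · intro hnone hinf
    obtain ⟨pre, suf, hps⟩ := hinf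
    have hpref : pat <+: (cs.drop c).drop pre.length := ⟨suf, by rw [← hps]; simp⟩
    rw [List.drop_drop] at hpref
    have hlt : c + pre.length < cs.length := by
      have hlen := congrArg List.length hps
      rcases pat with _ | ⟨a, pat'⟩
      · exact absurd rfl hpat
      · simp at hlen; omega
    exact hnone (c + pre.length) (by omega) hlt hpref

/-- If the pattern occurs right at `c`, `find(pat, c)` returns `c`. -/
theorem findFrom_at_occ (cs pat : List Char) (hpat : pat ≠ []) (c : Nat) (hc : c ≤ cs.length)
    (hocc : pat <+: cs.drop c) (hlt : c < cs.length) :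
    PySem.Chars.findFrom cs pat (c : Int) = (c : Int) := by
  have hne : PySem.Chars.findFrom cs pat (c : Int) ≠ -1 := by
    intro h
    exact (findFrom_eq_neg_one_iff_no_occ cs pat hpat c hc).mp h c le_rfl hlt hocc
  obtain ⟨h1, h2, h3⟩ := PySem.Chars.findFrom_natCast_spec cs pat c hc hne
  have : ¬ c < (PySem.Chars.findFrom cs pat (c : Int)).toNat := fun h => h3 c le_rfl h hocc
  omega

/-- If the pattern does not occur at `c`, `find(pat, c) = find(pat, c + 1)`. -/
theorem findFrom_step (cs pat : List Char) (hpat : pat ≠ []) (c : Nat) (hc : c + 1 ≤ cs.length)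
    (hnocc : ¬ pat <+: cs.drop c) :
    PySem.Chars.findFrom cs pat (c : Int) = PySem.Chars.findFrom cs pat ((c + 1 : Nat) : Int) := by
  by_cases h : PySem.Chars.findFrom cs pat (c : Int) = -1
  · have hnone := (findFrom_eq_neg_one_iff_no_occ cs pat hpat c (by omega)).mp h
    rw [h]
    exact ((findFrom_eq_neg_one_iff_no_occ cs pat hpat (c + 1) hc).mpr
      (fun t h1 h2 => hnone t (by omega) h2)).symm
  · obtain ⟨h1, h2, h3⟩ := PySem.Chars.findFrom_natCast_spec cs pat c (by omega) h
    set j := PySem.Chars.findFrom cs pat (c : Int) with hj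
    have hjc : j.toNat ≠ c := fun he => hnocc (he ▸ h2)
    have hjlt : j.toNat < cs.length := by
      obtain ⟨suf, hsuf⟩ := h2
      have := congrArg List.length hsuf
      rcases pat with _ | ⟨a, pat'⟩
      · exact absurd rfl hpat
      · simp at this; omega
    have h' : PySem.Chars.findFrom cs pat ((c + 1 : Nat) : Int) ≠ -1 := by
      intro he
      exact (findFrom_eq_neg_one_iff_no_occ cs pat hpat (c + 1) hc).mp he j.toNat (by omega)
        hjlt h2
    obtain ⟨h1', h2', h3'⟩ := PySem.Chars.findFrom_natCast_spec cs pat (c + 1) hc h'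
    set j' := PySem.Chars.findFrom cs pat ((c + 1 : Nat) : Int) with hj'
    have ha : ¬ j.toNat < j'.toNat := fun hlt => h3' j.toNat (by omega) hlt h2
    have hb : ¬ j'.toNat < j.toNat := fun hlt => h3 j'.toNat (by omega) hlt h2'
    omega

theorem pvSkipParen_at_paren (cs : List Char) (L k : Nat) (h : cs.getD k ' ' = '(') :
    pvSkipParen cs L k = k := by
  rw [pvSkipParen, if_neg (fun hh => hh.2 h)]

/-- The loop equivalence: A's find-driven loop equals B's startswith sweep with the
    precomputed close table, from any common position. -/
theorem loopA_eq_loopB (cs fn : List Char) (close : List Nat) (L : Nat) (hL : L = cs.length)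
    (hclose : ∀ p, p < L → cs.getD p ' ' = '(' →
      close.getD p 0 = pvDepthScan cs L (p + 1) 1 - 1) :
    ∀ (n c f1 f2 : Nat), L - c ≤ n → L - c < f1 → L - c < f2 →
      pvLoopA cs fn L f1 c = pvLoopB cs fn close L f2 c := by
  intro n
  induction n with
  | zero =>
    intro c f1 f2 hn h1 h2
    have hc : ¬ c < L := by omega
    obtain ⟨g1, rfl⟩ : ∃ g, f1 = g + 1 := ⟨f1 - 1, by omega⟩
    obtain ⟨g2, rfl⟩ : ∃ g, f2 = g + 1 := ⟨f2 - 1, by omega⟩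
    rw [pvLoopA, pvLoopB, if_neg hc, if_neg hc]
  | succ n ih =>
    intro c f1 f2 hn h1 h2
    by_cases hc : c < L
    · obtain ⟨g1, rfl⟩ : ∃ g, f1 = g + 1 := ⟨f1 - 1, by omega⟩
      obtain ⟨g2, rfl⟩ : ∃ g, f2 = g + 1 := ⟨f2 - 1, by omega⟩
      by_cases hpre : (fn ++ ['(']) <+: cs.drop c
      · -- the pattern starts at c: both sides emit the same call and jump to e + 1
        have hfind : PySem.Chars.findFrom cs (fn ++ ['(']) (c : Int) = (c : Int) :=
          findFrom_at_occ cs (fn ++ ['(']) (by simp) c (by omega) hpre (by omega)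
        have hop : c + fn.length < L := by
          obtain ⟨suf, hsuf⟩ := hpre
          have := congrArg List.length hsuf
          simp at this; omega
        obtain ⟨tail, htail⟩ := hpre
        have htail' : cs.drop c = fn ++ '(' :: tail := by simpa using htail.symm
        have hchar : cs.getD (c + fn.length) ' ' = '(' := by
          have hg : cs[c + fn.length]? = (cs.drop c)[fn.length]? := by
            simp [List.getElem?_drop]
          rw [List.getD_eq_getElem?_getD, hg, htail']
          simp
        have hskip : pvSkipParen cs L (c + fn.length) = c + fn.length :=
          pvSkipParen_at_paren cs L (c + fn.length) hchar
        have hcl : close.getD (c + fn.length) 0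
            = pvDepthScan cs L (c + fn.length + 1) 1 - 1 := hclose _ hop hchar
        have hstart : PySem.Chars.startswith (cs.drop c) (fn ++ ['(']) = true :=
          (PySem.Chars.startswith_iff _ _).mpr ⟨tail, htail⟩
        have hge : c + fn.length + 1 ≤ pvDepthScan cs L (c + fn.length + 1) 1 :=
          le_pvDepthScan cs L _ _
        have hneg : ¬ ((c : Int) < 0) := by omega
        have he : pvDepthScan cs L (c + fn.length + 1) 1 - 1 + 1
            = pvDepthScan cs L (c + fn.length + 1) 1 := by omega
        rw [pvLoopA, pvLoopB, if_pos hc, if_pos hc, if_pos hstart]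
        simp only [hfind, Int.toNat_natCast, hskip, hcl]
        rw [if_neg hneg, he,
          ih (pvDepthScan cs L (c + fn.length + 1) 1) g1 g2 (by omega) (by omega) (by omega)]
      · -- no pattern at c: B steps to c + 1; A's find skips c, so A is unchanged
        have hstart : ¬ PySem.Chars.startswith (cs.drop c) (fn ++ ['(']) = true := by
          rw [PySem.Chars.startswith_iff]; exact hpre
        rw [pvLoopB, if_pos hc, if_neg hstart]
        by_cases hc1 : c + 1 < L
        · have hstep := findFrom_step cs (fn ++ ['(']) (by simp) c (by omega) hpre
          have hAstep : pvLoopA cs fn L (g1 + 1) c = pvLoopA cs fn L (g1 + 1) (c + 1) := by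
            rw [pvLoopA, pvLoopA, if_pos hc, if_pos hc1, hstep]
          rw [hAstep]
          exact ih (c + 1) (g1 + 1) g2 (by omega) (by omega) (by omega)
        · -- c + 1 = L: no occurrence remains, both sides are empty
          have hnone : PySem.Chars.findFrom cs (fn ++ ['(']) (c : Int) = -1 := by
            rw [findFrom_eq_neg_one_iff_no_occ cs (fn ++ ['(']) (by simp) c (by omega)]
            intro t ht1 ht2
            have : t = c := by omega
            exact this ▸ hpre
          rw [pvLoopA, if_pos hc]
          simp only [hnone]
          rw [if_pos (by norm_num)]
          obtain ⟨g2', rfl⟩ : ∃ g, g2 = g + 1 := ⟨g2 - 1, by omega⟩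
          rw [pvLoopB, if_neg (by omega)]
    · obtain ⟨g1, rfl⟩ : ∃ g, f1 = g + 1 := ⟨f1 - 1, by omega⟩
      obtain ⟨g2, rfl⟩ : ∃ g, f2 = g + 1 := ⟨f2 - 1, by omega⟩
      rw [pvLoopA, pvLoopB, if_neg hc, if_neg hc]

-- ===== VERDICT (by name: the statement is the Claim_ definition above) =====
theorem iter_calls_spec : Claim_equal_iter_calls := by
  intro expr fname _
  unfold Spec_iter_calls iter_calls iter_calls_alt
  exact loopA_eq_loopB expr.toList fname.toList (pvCloseTable expr.toList)
    expr.toList.length rfl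
    (fun p hp hc => pvCloseTable_spec expr.toList p hp hc)
    expr.toList.length 0 (expr.toList.length + 1) (expr.toList.length + 1)
    (by omega) (by omega) (by omega)
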